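-- pv_equiv track=rewrite | github.com/AdamZhouSE/pythonHomework | Code/CodeRecords/2609/8246/310145.py | calc
-- ===== SOURCE A (Python) =====
-- def calc(arr, n, k):
--     dist_count = 0
--     for i in range(n):
--
--         j = 0
--         while j < n:
--             if (i != j and arr[j] == arr[i]):
--                 break
--             j += 1
--
--         if (j == n):
--             dist_count += 1
--
--         if (dist_count == k):
--             return arr[i]
--
--     return -1
-- ===== SOURCE B (Python) =====
-- def calc(arr, n, k):
--     if n <= 0:
--         return -1
--     prefix = arr[:n]
--     freq = {}
--     for x in prefix:
--         freq[x] = freq.get(x, 0) + 1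
--     singles = [x for x in prefix if freq[x] == 1]
--     if 1 <= k <= len(singles):
--         return singles[k - 1]
--     return -1
-- ===== Notes on version B (the rewrite author's own statement) =====
-- stated objective: simpler
-- what changed: A's nested index loops with an incremental dist_count accumulator and early return are replaced by a frequency dictionary built in one pass over arr[:n], a single filtered pass producing the appearance-ordered unique elements, and a direct k-1 index with a 1 <= k <= len guard.
-- intended difference: When k == 0, n >= 1 and arr[0] occurs at least twice in arr[:n], A's check fires before any unique element was counted and it returns arr[0]; B returns -1, the intended 'no such element' answer, since there is no 0-th unique element (D_ also requires arr[0] != -1, the sub-case where the two values coincide). — e.g. on calc([5, 5], 2, 0): A returns 5, B returns -1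
-- outside the precondition, e.g. on calc([1, 1], 5, 0): A returns 1, B returns -1; on calc([1, 2], 5, 1): A raises IndexError, B returns 1
import Mathlib
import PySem

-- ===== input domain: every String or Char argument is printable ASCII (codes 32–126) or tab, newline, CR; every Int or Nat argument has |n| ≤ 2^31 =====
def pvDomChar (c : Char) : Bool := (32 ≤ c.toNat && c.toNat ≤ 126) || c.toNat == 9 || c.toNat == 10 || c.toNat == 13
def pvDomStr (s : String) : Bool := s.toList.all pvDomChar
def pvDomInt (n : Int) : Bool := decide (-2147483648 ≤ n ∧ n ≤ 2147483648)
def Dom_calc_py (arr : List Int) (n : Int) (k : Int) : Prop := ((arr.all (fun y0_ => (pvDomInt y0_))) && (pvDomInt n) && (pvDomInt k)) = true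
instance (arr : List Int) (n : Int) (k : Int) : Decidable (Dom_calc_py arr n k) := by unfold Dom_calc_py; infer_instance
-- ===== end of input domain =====

-- B replaces A's quadratic nested index scans by a one-pass frequency dict plus a filtered pass and a direct k-1 index (simpler, asymptotically faster).


-- ===== PORT A =====
-- inner 'while j < n: if (i != j and arr[j] == arr[i]): break; j += 1'; arr[·] is
-- in range under Pre_ (0 ≤ j,i < n ≤ len arr), so pyGet? … |>.getD 0 is exact there
def pvWhileJ (arr : List Int) (n i : Int) : Int → Nat → Int
  | j, 0 => j
  | j, fuel+1 =>
    if j < n then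
      if i ≠ j ∧ (PySem.List.pyGet? arr j).getD 0 = (PySem.List.pyGet? arr i).getD 0 then j
      else pvWhileJ arr n i (j+1) fuel
    else j

-- outer 'for i in range(n)' with dist_count and the two ifs, early return on dist_count == k
def pvOuterA (arr : List Int) (n k : Int) : Int → Int → Nat → Int
  | _, _, 0 => -1
  | dist, i, fuel+1 =>
    let j := pvWhileJ arr n i 0 n.toNat
    let dist' := if j = n then dist + 1 else dist
    if dist' = k then (PySem.List.pyGet? arr i).getD 0
    else pvOuterA arr n k dist' (i+1) fuel

def calc_py (arr : List Int) (n : Int) (k : Int) : Int := pvOuterA arr n k 0 0 n.toNat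

-- ===== PORT B =====
-- Source B: guard n <= 0; prefix = arr[:n]; freq dict loop; singles comprehension; guarded k-1 index
def calc_py_alt (arr : List Int) (n : Int) (k : Int) : Int :=
  if n ≤ 0 then -1 else
  let pfx := PySem.List.slice arr none (some n)
  let freq := pfx.foldl (fun d x => d.insert x (d.getD x 0 + 1)) (PySem.Dict.empty : PySem.Dict Int Int)
  let singles := pfx.filter (fun x => freq.getD x 0 == 1)
  -- 'singles[k-1]' is in range under the guard, so pyGet? … |>.getD 0 is exact
  if 1 ≤ k ∧ k ≤ (singles.length : Int) then (PySem.List.pyGet? singles (k-1)).getD 0 else -1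

-- ===== PRECONDITION & SPEC =====
-- Pre_ excludes n > len(arr): there A in general raises IndexError; on a few such inputs
-- (the k == 0 duplicate-first-element path) A still returns before indexing out of range,
-- and those accidental early returns are excluded with the rest of the region.
def Pre_calc_py (arr : List Int) (n : Int) (k : Int) : Prop := n ≤ (arr.length : Int)
instance (arr : List Int) (n : Int) (k : Int) : Decidable (Pre_calc_py arr n k) := by unfold Pre_calc_py; infer_instance
def pvWitness_calc_py : List Int × Int × Int := ([1, 2, 2, 3], 4, 2)

-- When k == 0, n ≥ 1 and arr[0] occurs at least twice in arr[:n], A returns arr[0] (its check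
-- fires before any unique element was counted); B returns -1, the intended 'no such element'
-- answer, since there is no 0-th unique element (D_ also requires arr[0] ≠ -1, the sub-case
-- where the two values coincide).
def D_calc_py (arr : List Int) (n : Int) (k : Int) : Prop :=
  k = 0 ∧ 0 < n ∧ 2 ≤ (arr.take n.toNat).count (arr.headD 0) ∧ arr.headD 0 ≠ -1
instance (arr : List Int) (n : Int) (k : Int) : Decidable (D_calc_py arr n k) := by unfold D_calc_py; infer_instance

def Spec_calc_py (arr : List Int) (n : Int) (k : Int) (out : Int) : Prop := ¬ D_calc_py arr n k → out = calc_py_alt arr n k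
instance (arr : List Int) (n : Int) (k : Int) (out : Int) : Decidable (Spec_calc_py arr n k out) := by unfold Spec_calc_py; infer_instance

def pvDiffWitness_calc_py : List Int × Int × Int := ([5, 5], 2, 0)
def pvDiffWitnessOut_calc_py : Int × Int := (5, -1)

-- ===== CLAIM (what is proved, stated in full; the proofs are below) =====
def Claim_unchanged_calc_py : Prop := ∀ (arr : List Int) (n : Int) (k : Int), Dom_calc_py arr n k → Pre_calc_py arr n k → Spec_calc_py arr n k (calc_py arr n k)
def Claim_changed_calc_py : Prop := Dom_calc_py (pvDiffWitness_calc_py.1) (pvDiffWitness_calc_py.2.1) (pvDiffWitness_calc_py.2.2) ∧ Pre_calc_py (pvDiffWitness_calc_py.1) (pvDiffWitness_calc_py.2.1) (pvDiffWitness_calc_py.2.2) ∧ D_calc_py (pvDiffWitness_calc_py.1) (pvDiffWitness_calc_py.2.1) (pvDiffWitness_calc_py.2.2) ∧ calc_py (pvDiffWitness_calc_py.1) (pvDiffWitness_calc_py.2.1) (pvDiffWitness_calc_py.2.2) = pvDiffWitnessOut_calc_py.1 ∧ calc_py_alt (pvDiffWitness_calc_py.1) (pvDiffWitness_calc_py.2.1)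 (pvDiffWitness_calc_py.2.2) = pvDiffWitnessOut_calc_py.2 ∧ pvDiffWitnessOut_calc_py.1 ≠ pvDiffWitnessOut_calc_py.2
def Claim_exact_calc_py : Prop := ∀ (arr : List Int) (n : Int) (k : Int), Dom_calc_py arr n k → Pre_calc_py arr n k → D_calc_py arr n k → calc_py arr n k ≠ calc_py_alt arr n k

-- ===== LEMMAS AND PROOFS =====

-- indexing helper: arr[j] for 0 ≤ j < len
theorem pvGetA (arr : List Int) (j : Int) (h0 : 0 ≤ j) (h1 : j < (arr.length : Int)) :
    (PySem.List.pyGet? arr j).getD 0 = arr[j.toNat]'(by omega) := by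
  rw [PySem.List.pyGet?_eq_some_getElem arr h0 h1]; rfl

-- the inner while loop returns n iff no other in-range index holds the same value
theorem pvWhileJ_eq_n_iff (arr : List Int) (n i : Int) (fuel : Nat) :
    ∀ (j : Int), 0 ≤ j → j + (fuel : Int) = n →
    (pvWhileJ arr n i j fuel = n ↔
      ∀ j', j ≤ j' → j' < n → j' ≠ i →
        (PySem.List.pyGet? arr j').getD 0 ≠ (PySem.List.pyGet? arr i).getD 0) := by
  induction fuel with
  | zero =>
    intro j hj0 hj
    simp only [pvWhileJ, Nat.cast_zero, add_zero] at *
    subst hj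
    constructor
    · intro _ j' h1 h2 _; omega
    · intro _; rfl
  | succ fuel ih =>
    intro j hj0 hj
    have hjn : j < n := by push_cast at hj; omega
    simp only [pvWhileJ, if_pos hjn]
    by_cases hc : i ≠ j ∧ (PySem.List.pyGet? arr j).getD 0 = (PySem.List.pyGet? arr i).getD 0
    · rw [if_pos hc]
      constructor
      · intro h; omega
      · intro h
        exact absurd hc.2 (h j le_rfl hjn (Ne.symm hc.1))
    · rw [if_neg hc]
      have hrec := ih (j + 1) (by omega) (by push_cast at hj ⊢; omega)
      rw [hrec]
      constructor
      · intro h j' h1 h2 h3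
        by_cases hje : j' = j
        · subst hje
          rcases not_and_or.mp hc with h4 | h4
          · exact absurd (Ne.symm h3) h4
          · exact h4
        · exact h j' (by omega) h2 h3
      · intro h j' h1 h2 h3
        exact h j' (by omega) h2 h3

-- count = 1 iff no other index carries the same value
theorem pvCountOne (p : List Int) (m : Nat) (hm : m < p.length) :
    p.count (p[m]'hm) = 1 ↔ ∀ j, (hj : j < p.length) → j ≠ m → p[j]'hj ≠ p[m]'hm := by
  obtain ⟨v, hv⟩ : ∃ v, p[m]'hm = v := ⟨_, rfl⟩
  rw [hv]
  have hsplit : p.count v = (p.take m).count v + (1 + (p.drop (m+1)).count v) := by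
    conv_lhs => rw [← List.take_append_drop m p]
    rw [List.count_append, List.drop_eq_getElem_cons hm, hv, List.count_cons_self]
    omega
  constructor
  · intro h j hj hne heq
    have h1 : (p.take m).count v = 0 := by omega
    have h2 : (p.drop (m+1)).count v = 0 := by omega
    rcases Nat.lt_or_ge j m with hlt | hge
    · have hmem : v ∈ p.take m := by
        refine List.mem_iff_getElem.mpr ⟨j, by simp [List.length_take]; omega, ?_⟩
        rw [List.getElem_take]; exact heq
      rw [List.count_eq_zero] at h1; exact h1 hmem
    · have hgt : m + 1 ≤ j := by omega
      have hmem : v ∈ p.drop (m+1) := by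
        refine List.mem_iff_getElem.mpr ⟨j - (m+1), by simp [List.length_drop]; omega, ?_⟩
        rw [List.getElem_drop]
        have hidx : m + 1 + (j - (m+1)) = j := by omega
        simp only [hidx]; exact heq
      rw [List.count_eq_zero] at h2; exact h2 hmem
  · intro h
    have h1 : (p.take m).count v = 0 := by
      rw [List.count_eq_zero]
      intro hmem
      obtain ⟨j, hj, hEq⟩ := List.mem_iff_getElem.mp hmem
      have hjm : j < m := by have := hj; simp [List.length_take] at this; omega
      rw [List.getElem_take] at hEq
      exact h j (by omega) (by omega) hEq
    have h2 : (p.drop (m+1)).count v = 0 := by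
      rw [List.count_eq_zero]
      intro hmem
      obtain ⟨j, hj, hEq⟩ := List.mem_iff_getElem.mp hmem
      have hjl : m + 1 + j < p.length := by have := hj; simp [List.length_drop] at this; omega
      rw [List.getElem_drop] at hEq
      exact h (m + 1 + j) hjl (by omega) hEq
    omega

-- the inner loop characterised by a count over the prefix
theorem pvUniqueIff (arr : List Int) (n : Int) (hn0 : 0 ≤ n) (hlen : n ≤ (arr.length : Int))
    (m : Nat) (hm : m < n.toNat) :
    (pvWhileJ arr n (m : Int) 0 n.toNat = n ↔
      (arr.take n.toNat).count ((arr.take n.toNat)[m]'(by simp; omega)) = 1) := by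
  have hml : m < arr.length := by omega
  have hptake : ((arr.take n.toNat)[m]'(by simp; omega)) = arr[m]'hml := List.getElem_take
  rw [pvWhileJ_eq_n_iff arr n (m : Int) n.toNat 0 le_rfl (by omega)]
  rw [pvCountOne (arr.take n.toNat) m (by simp; omega)]
  constructor
  · intro h j hj hne
    have hjl : j < n.toNat := by have := hj; simp at this; omega
    have hg : (arr.take n.toNat)[j]'hj = arr[j]'(by omega) := List.getElem_take
    rw [hg, hptake]
    have := h (j : Int) (by omega) (by omega) (by exact_mod_cast fun hh => hne (by exact_mod_cast hh))
    rw [pvGetA arr (j : Int) (by omega) (by omega),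
        pvGetA arr (m : Int) (by omega) (by omega)] at this
    simpa using this
  · intro h j' h1 h2 h3
    have hj'l : j'.toNat < n.toNat := by omega
    rw [pvGetA arr j' h1 (by omega), pvGetA arr (m : Int) (by omega) (by omega)]
    have hg : (arr.take n.toNat)[j'.toNat]'(by simp; omega) = arr[j'.toNat]'(by omega) :=
      List.getElem_take
    have := h j'.toNat (by simp; omega) (by omega)
    rw [hg, hptake] at this
    simpa using this

-- once dist_count has passed k it never returns to it: the loop falls through to -1
theorem pvOuterA_neg (arr : List Int) (n k : Int) :
    ∀ (fuel : Nat) (dist i : Int), k < dist → pvOuterA arr n k dist i fuel = -1 := by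
  intro fuel
  induction fuel with
  | zero => intro dist i _; rfl
  | succ fuel ih =>
    intro dist i hk
    simp only [pvOuterA]
    by_cases hw : pvWhileJ arr n i 0 n.toNat = n
    · rw [if_pos hw, if_neg (by omega)]
      exact ih _ _ (by omega)
    · rw [if_neg hw, if_neg (by omega)]
      exact ih _ _ hk

-- main loop invariant, k ≥ 1: from position m with dist unique elements seen and dist < k,
-- the loop returns the (k-dist)-th remaining unique element, or -1 if there are too few
theorem pvOuterA_main (arr : List Int) (n k : Int) (hn0 : 0 ≤ n) (hlen : n ≤ (arr.length : Int)) :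
    ∀ (fuel m : Nat) (dist : Int), m + fuel = n.toNat → dist < k →
      pvOuterA arr n k dist (m : Int) fuel =
        (let s := ((arr.take n.toNat).drop m).filter
            (fun x => ((arr.take n.toNat).count x : Int) == 1)
         if k - dist ≤ (s.length : Int) then s.getD (k - dist - 1).toNat 0 else -1) := by
  intro fuel
  induction fuel with
  | zero =>
    intro m dist hm hk
    have hdrop : (arr.take n.toNat).drop m = [] := by
      apply List.drop_eq_nil_of_le; simp; omega
    simp [pvOuterA, hdrop]
    omega
  | succ fuel ih =>
    intro m dist hm hk
    have hmlt : m < n.toNat := by omega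
    have hmp : m < (arr.take n.toNat).length := by simp; omega
    set p := arr.take n.toNat with hp
    have hdropcons : p.drop m = p[m]'hmp :: p.drop (m+1) := List.drop_eq_getElem_cons hmp
    have hget : (PySem.List.pyGet? arr (m : Int)).getD 0 = p[m]'hmp := by
      rw [pvGetA arr (m : Int) (by omega) (by omega)]
      simp only [hp]
      exact (List.getElem_take).symm
    simp only [pvOuterA]
    by_cases hu : pvWhileJ arr n (m : Int) 0 n.toNat = n
    · -- p[m] is unique in the prefix
      have hcount : p.count (p[m]'hmp) = 1 := (pvUniqueIff arr n hn0 hlen m hmlt).mp hu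
      have hfc : (p.drop m).filter (fun x => ((p.count x : Int) == 1)) =
          p[m]'hmp :: (p.drop (m+1)).filter (fun x => ((p.count x : Int) == 1)) := by
        rw [hdropcons, List.filter_cons_of_pos (by simp [hcount])]
      rw [if_pos hu]
      by_cases hke : dist + 1 = k
      · rw [if_pos hke, hget]
        simp only [hfc]
        rw [if_pos (show k - dist ≤ ((p[m]'hmp :: ((p.drop (m+1)).filter
            (fun x => ((p.count x : Int) == 1)))).length : Int) by push_cast [List.length_cons]; omega)]
        have h0 : (k - dist - 1).toNat = 0 := by omega
        rw [h0, List.getD_cons_zero]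
      · rw [if_neg hke]
        have hrec := ih (m+1) (dist+1) (by omega) (by omega)
        push_cast at hrec ⊢
        rw [hrec]
        simp only [hfc]
        by_cases hle : k - (dist + 1) ≤
            ((((p.drop (m+1)).filter (fun x => ((p.count x : Int) == 1))).length : Int))
        · rw [if_pos hle, if_pos (by push_cast [List.length_cons]; omega)]
          have hidx : (k - dist - 1).toNat = (k - (dist+1) - 1).toNat + 1 := by omega
          rw [hidx, List.getD_cons_succ]
        · rw [if_neg hle, if_neg (by push_cast [List.length_cons] at hle ⊢; omega)]
    · -- p[m] is duplicated in the prefix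
      have hcount : p.count (p[m]'hmp) ≠ 1 :=
        fun hc => hu ((pvUniqueIff arr n hn0 hlen m hmlt).mpr hc)
      have hfc : (p.drop m).filter (fun x => ((p.count x : Int) == 1)) =
          (p.drop (m+1)).filter (fun x => ((p.count x : Int) == 1)) := by
        rw [hdropcons, List.filter_cons_of_neg (by simp [hcount])]
      rw [if_neg hu, if_neg (by omega)]
      have hrec := ih (m+1) dist (by omega) hk
      push_cast at hrec ⊢
      rw [hrec]
      simp only [hfc]

-- B rewritten over the prefix: slice and dict eliminated
theorem pvAltChar (arr : List Int) (n k : Int) (hn : 0 < n) :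
    calc_py_alt arr n k =
      (let singles := (arr.take n.toNat).filter
          (fun x => (((arr.take n.toNat).count x : Int) == 1))
       if 1 ≤ k ∧ k ≤ (singles.length : Int) then
         (PySem.List.pyGet? singles (k-1)).getD 0 else -1) := by
  simp only [calc_py_alt, if_neg (show ¬ n ≤ 0 by omega),
    PySem.List.slice_to arr (show (0 : Int) ≤ n by omega),
    PySem.Dict.foldl_insert_getD_add_one_eq_counter, PySem.Dict.getD_counter]

-- the guarded index in B equals getD
theorem pvIndexEq (s : List Int) (k : Int) (h1 : 1 ≤ k) (h2 : k ≤ (s.length : Int)) :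
    (PySem.List.pyGet? s (k-1)).getD 0 = s.getD (k-1).toNat 0 := by
  rw [pvGetA s (k-1) (by omega) (by omega)]
  rw [List.getD_eq_getElem?_getD, List.getElem?_eq_getElem (by omega)]
  rfl

-- ===== VERDICT (by name: the statement is the Claim_ definition above) =====
theorem calc_py_spec : Claim_unchanged_calc_py := by
  intro arr n k _ hpre hnd
  unfold Pre_calc_py at hpre
  by_cases hn : n ≤ 0
  · -- empty range: both return -1
    have ht : n.toNat = 0 := by omega
    unfold calc_py calc_py_alt
    rw [ht, if_pos hn]; rfl
  · push Not at hn
    set p := arr.take n.toNat with hp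
    rw [pvAltChar arr n k hn]
    by_cases hk1 : 1 ≤ k
    · -- k ≥ 1: both return the (k-1)-th unique element
      have hmain := pvOuterA_main arr n k (by omega) hpre n.toNat 0 0 (by omega) (by omega)
      unfold calc_py
      simp only [Nat.cast_zero] at hmain
      rw [hmain]
      simp only [List.drop_zero, sub_zero, ← hp]
      by_cases hle : k ≤ ((p.filter (fun x => ((p.count x : Int) == 1))).length : Int)
      · rw [if_pos hle, if_pos ⟨hk1, hle⟩]
        exact (pvIndexEq _ k hk1 hle).symm
      · rw [if_neg hle, if_neg (by tauto)]
    · -- k ≤ 0: B returns -1; A does too outside D_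
      push Not at hk1
      rw [if_neg (by omega)]
      unfold calc_py
      by_cases hk0 : k = 0
      · subst hk0
        obtain ⟨f, hf⟩ : ∃ f, n.toNat = f + 1 := ⟨n.toNat - 1, by omega⟩
        have h0p : 0 < (arr.take n.toNat).length := by simp; omega
        have harrne : arr ≠ [] := by intro h; subst h; simp at hpre; omega
        have hhead : (arr.take n.toNat)[0]'h0p = arr.headD 0 := by
          have : (arr.take n.toNat)[0]'h0p = arr[0]'(by omega) := List.getElem_take
          rw [this]
          cases arr with
          | nil => simp at harrne
          | cons a l => rfl
        rw [hf]
        simp only [pvOuterA]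
        by_cases hu : pvWhileJ arr n 0 0 n.toNat = n
        · -- arr[0] unique: dist becomes 1, never 0 again
          have : pvWhileJ arr n ((0:Nat) : Int) 0 n.toNat = n := by simpa using hu
          rw [if_pos hu, if_neg (by omega)]
          exact pvOuterA_neg arr n 0 f 1 1 (by omega)
        · -- arr[0] duplicated: A returns arr[0]; outside D_ that is -1
          have hcn : (arr.take n.toNat).count ((arr.take n.toNat)[0]'h0p) ≠ 1 := by
            intro hc
            have : pvWhileJ arr n ((0:Nat) : Int) 0 n.toNat = n :=
              (pvUniqueIff arr n (by omega) hpre 0 (by omega)).mpr hc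
            exact hu (by simpa using this)
          have hcpos : 0 < (arr.take n.toNat).count ((arr.take n.toNat)[0]'h0p) :=
            List.count_pos_iff.mpr (List.getElem_mem h0p)
          have hc2 : 2 ≤ (arr.take n.toNat).count (arr.headD 0) := by
            rw [← hhead]; omega
          have hne : arr.headD 0 = -1 := by
            by_contra hne
            exact hnd ⟨rfl, hn, hc2, hne⟩
          rw [if_neg hu, if_pos rfl]
          rw [pvGetA arr 0 (by omega) (by omega)]
          have : arr[(0:Int).toNat]'(by omega) = arr.headD 0 := by
            cases arr with
            | nil => simp at harrne
            | cons a l => rfl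
          rw [this, hne]
      · -- k < 0: dist starts above k
        exact pvOuterA_neg arr n k n.toNat 0 0 (by omega)

theorem calc_py_changed : Claim_changed_calc_py := by
  unfold Claim_changed_calc_py; decide

theorem calc_py_tight : Claim_exact_calc_py := by
  intro arr n k _ hpre hd
  obtain ⟨hk0, hn, hc2, hne⟩ := hd
  unfold Pre_calc_py at hpre
  subst hk0
  have harrne : arr ≠ [] := by intro h; subst h; simp at hpre; omega
  have h0p : 0 < (arr.take n.toNat).length := by simp; omega
  have hhead : (arr.take n.toNat)[0]'h0p = arr.headD 0 := by
    have : (arr.take n.toNat)[0]'h0p = arr[0]'(by omega) := List.getElem_take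
    rw [this]
    cases arr with
    | nil => simp at harrne
    | cons a l => rfl
  -- A returns arr.headD 0
  have hA : calc_py arr n 0 = arr.headD 0 := by
    unfold calc_py
    obtain ⟨f, hf⟩ : ∃ f, n.toNat = f + 1 := ⟨n.toNat - 1, by omega⟩
    rw [hf]
    simp only [pvOuterA]
    have hu : ¬ pvWhileJ arr n 0 0 n.toNat = n := by
      intro hu
      have := (pvUniqueIff arr n (by omega) hpre 0 (by omega)).mp (by simpa using hu)
      rw [hhead] at this; omega
    rw [if_neg hu, if_pos rfl]
    rw [pvGetA arr 0 (by omega) (by omega)]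
    cases arr with
    | nil => simp at harrne
    | cons a l => rfl
  -- B returns -1
  have hB : calc_py_alt arr n 0 = -1 := by
    rw [pvAltChar arr n 0 hn]
    rw [if_neg (by omega)]
  rw [hA, hB]
  exact hne
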